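-- pv_equiv track=rewrite | github.com/NaveenRohit45/compare-tool | streamlit_app.py | get_aligned_table_diff
-- ===== SOURCE A (Python) =====
-- def get_aligned_table_diff(old_table, new_table):
--     aligned_diff = []
--     changes = {"replace": 0, "insert": 0, "delete": 0, "equal": 0}
--
--     max_rows = max(len(old_table), len(new_table))
--     for i in range(max_rows):
--         old_row = old_table[i] if i < len(old_table) else []
--         new_row = new_table[i] if i < len(new_table) else []
--
--         max_cols = max(len(old_row), len(new_row))
--         row_diff = []
--
--         for j in range(max_cols):
--             old_cell = old_row[j] if j < len(old_row) else ""
--             new_cell = new_row[j] if j < len(new_row) else ""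
--             tag = "equal" if old_cell == new_cell else "replace"
--             if old_cell == "" and new_cell:
--                 tag = "insert"
--             elif new_cell == "" and old_cell:
--                 tag = "delete"
--             row_diff.append((old_cell, new_cell, tag))
--             changes[tag] += 1
--
--         aligned_diff.append(row_diff)
--
--     return aligned_diff, changes
-- ===== SOURCE B (Python) =====
-- def _tag(o, n):
--     if o == n:
--         return "equal"
--     if o == "":
--         return "insert"
--     if n == "":
--         return "delete"
--     return "replace"
--
--
-- def get_aligned_table_diff(old_table, new_table):
--     # Stage 1: consume both tables as stacks (reverse + pop), no index
--     # arithmetic or length maxima anywhere.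
--     aligned_diff = []
--     rows_old, rows_new = old_table[::-1], new_table[::-1]
--     while rows_old or rows_new:
--         cells_old = (rows_old.pop() if rows_old else [])[::-1]
--         cells_new = (rows_new.pop() if rows_new else [])[::-1]
--         row = []
--         while cells_old or cells_new:
--             o = cells_old.pop() if cells_old else ""
--             n = cells_new.pop() if cells_new else ""
--             row.append((o, n, _tag(o, n)))
--         aligned_diff.append(row)
--     # Stage 2: tally the change counts by scanning the finished table per tag.
--     tags = [t for row in aligned_diff for _, _, t in row]
--     changes = {t: tags.count(t) for t in ("replace", "insert", "delete", "equal")}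
--     return aligned_diff, changes
-- ===== Notes on version B (the rewrite author's own statement) =====
-- stated objective: alternative
-- what changed: Replaces A's index-driven range(max(len,...)) loops with inline counter updates by a stack-consumption pass (reverse both tables and pop rows/cells until both stacks are empty, no indices or length maxima) followed by a separate per-tag tally that scans the finished table with list.count for each of the four tags.
import Mathlib
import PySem

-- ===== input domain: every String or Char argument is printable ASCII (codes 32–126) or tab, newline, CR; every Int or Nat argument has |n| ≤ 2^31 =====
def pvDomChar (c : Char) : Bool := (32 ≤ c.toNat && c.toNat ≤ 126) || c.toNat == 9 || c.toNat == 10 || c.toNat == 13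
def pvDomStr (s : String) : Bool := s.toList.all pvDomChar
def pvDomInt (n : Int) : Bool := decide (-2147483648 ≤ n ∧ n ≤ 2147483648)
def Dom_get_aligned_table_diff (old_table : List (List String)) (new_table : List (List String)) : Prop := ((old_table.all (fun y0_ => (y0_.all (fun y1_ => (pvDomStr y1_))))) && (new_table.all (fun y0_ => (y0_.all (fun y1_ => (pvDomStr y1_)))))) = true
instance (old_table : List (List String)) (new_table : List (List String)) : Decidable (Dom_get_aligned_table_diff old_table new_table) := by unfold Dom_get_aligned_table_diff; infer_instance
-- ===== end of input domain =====

-- B replaces A's index-driven range/max loops with inline counting by a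
-- stack-consumption pass (reverse + pop until both stacks are empty) and a
-- separate per-tag tally over the finished table; objective: alternative decomposition.

-- ===== PORT A =====
-- literal transliteration of A: index loops over range(max_rows)/range(max_cols),
-- threading (aligned_diff, changes) through the fold exactly as the Python does.
def get_aligned_table_diff (old_table : List (List String)) (new_table : List (List String)) : (List (List (String × String × String))) × (List (String × Int)) :=
  let changes0 : PySem.Dict String Int :=
    PySem.Dict.ofList [("replace", 0), ("insert", 0), ("delete", 0), ("equal", 0)]
  let max_rows : Int := max (old_table.length : Int) (new_table.length : Int)
  let st := (PySem.List.pyRange 0 max_rows 1).foldl (fun st i =>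
    let old_row := if i < (old_table.length : Int) then PySem.List.pyGetD old_table i [] else []
    let new_row := if i < (new_table.length : Int) then PySem.List.pyGetD new_table i [] else []
    let max_cols : Int := max (old_row.length : Int) (new_row.length : Int)
    let st2 := (PySem.List.pyRange 0 max_cols 1).foldl (fun st2 j =>
      let old_cell := if j < (old_row.length : Int) then PySem.List.pyGetD old_row j "" else ""
      let new_cell := if j < (new_row.length : Int) then PySem.List.pyGetD new_row j "" else ""
      let tag := if old_cell == new_cell then "equal" else "replace"
      let tag := if old_cell == "" && new_cell != "" then "insert"
                 else if new_cell == "" && old_cell != "" then "delete" else tag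
      (st2.1 ++ [(old_cell, new_cell, tag)], st2.2.modify tag 0 (· + 1)))
      (([] : List (String × String × String)), st.2)
    (st.1 ++ [st2.1], st2.2))
    (([] : List (List (String × String × String))), changes0)
  (st.1, st.2.items)

-- ===== PORT B =====
-- _tag from Source B
def pvTag (o n : String) : String :=
  if o == n then "equal"
  else if o == "" then "insert"
  else if n == "" then "delete"
  else "replace"

-- inner while loop of Source B: pop a cell from each stack (default "") until both empty
-- ('cells.pop()' = getLast? / dropLast on the stack list; exact)
def pvCellLoop (co cn : List String) (row : List (String × String × String)) : List (String × String × String) :=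
  if _h : co = [] ∧ cn = [] then row
  else
    let o := (co.getLast?).getD ""
    let n := (cn.getLast?).getD ""
    pvCellLoop co.dropLast cn.dropLast (row ++ [(o, n, pvTag o n)])
termination_by co.length + cn.length
decreasing_by
  rcases co with _ | ⟨a, as⟩ <;> rcases cn with _ | ⟨b, bs⟩ <;>
    simp_all [List.length_dropLast] <;> omega

-- outer while loop of Source B: pop a row from each stack (default []), reverse it
-- into a cell stack ('row[::-1]' = List.reverse; exact) and run the inner loop
def pvRowLoop (ro rn : List (List String)) (acc : List (List (String × String × String))) : List (List (String × String × String)) :=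
  if _h : ro = [] ∧ rn = [] then acc
  else
    let co := ((ro.getLast?).getD []).reverse
    let cn := ((rn.getLast?).getD []).reverse
    pvRowLoop ro.dropLast rn.dropLast (acc ++ [pvCellLoop co cn []])
termination_by ro.length + rn.length
decreasing_by
  rcases ro with _ | ⟨a, as⟩ <;> rcases rn with _ | ⟨b, bs⟩ <;>
    simp_all [List.length_dropLast] <;> omega

def get_aligned_table_diff_alt (old_table : List (List String)) (new_table : List (List String)) : (List (List (String × String × String))) × (List (String × Int)) :=
  -- Stage 1: stack consumption ('table[::-1]' = List.reverse; exact)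
  let aligned_diff := pvRowLoop old_table.reverse new_table.reverse []
  -- Stage 2: the tag comprehension and the per-tag count dict
  let tags := aligned_diff.flatMap (fun row => row.map (fun t => t.2.2))
  let changes : List (String × Int) :=
    [("replace", (tags.count "replace" : Int)), ("insert", (tags.count "insert" : Int)),
     ("delete", (tags.count "delete" : Int)), ("equal", (tags.count "equal" : Int))]
  (aligned_diff, changes)

-- ===== PRECONDITION & SPEC =====
def Spec_get_aligned_table_diff (old_table : List (List String)) (new_table : List (List String)) (out : (List (List (String × String × String))) × (List (String × Int))) : Prop := out = get_aligned_table_diff_alt old_table new_table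
instance (old_table : List (List String)) (new_table : List (List String)) (out : (List (List (String × String × String))) × (List (String × Int))) : Decidable (Spec_get_aligned_table_diff old_table new_table out) := by unfold Spec_get_aligned_table_diff; infer_instance

-- ===== CLAIM (what is proved, stated in full; the proofs are below) =====
def Claim_equal_get_aligned_table_diff : Prop := ∀ (old_table : List (List String)) (new_table : List (List String)), Dom_get_aligned_table_diff old_table new_table → Spec_get_aligned_table_diff old_table new_table (get_aligned_table_diff old_table new_table)

-- ===== LEMMAS AND PROOFS =====

-- canonical value of one aligned row / of the whole aligned table
def rowOf : List String → List String → List (String × String × String)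
  | [], [] => []
  | o :: os, [] => (o, "", pvTag o "") :: rowOf os []
  | [], n :: ns => ("", n, pvTag "" n) :: rowOf [] ns
  | o :: os, n :: ns => (o, n, pvTag o n) :: rowOf os ns

def tableOf : List (List String) → List (List String) → List (List (String × String × String))
  | [], [] => []
  | r :: rs, [] => rowOf r [] :: tableOf rs []
  | [], r :: rs => rowOf [] r :: tableOf [] rs
  | r :: rs, s :: ss => rowOf r s :: tableOf rs ss

-- B's inner stack loop computes rowOf
lemma pv_cellLoop_eq : ∀ (xs ys : List String) (acc : List (String × String × String)),
    pvCellLoop xs.reverse ys.reverse acc = acc ++ rowOf xs ys := by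
  intro xs
  induction xs with
  | nil =>
    intro ys
    induction ys with
    | nil => intro acc; rw [pvCellLoop]; simp [rowOf]
    | cons n ns ih =>
      intro acc
      rw [pvCellLoop]
      simp only [List.reverse_cons, List.reverse_nil]
      rw [dif_neg (by simp)]
      simp only [List.getLast?_concat, List.dropLast_concat, List.getLast?_nil,
        List.dropLast_nil, Option.getD_some, Option.getD_none]
      simp only [List.reverse_nil] at ih
      rw [ih]
      simp [rowOf]
  | cons o os ih =>
    intro ys acc
    cases ys with
    | nil =>
      rw [pvCellLoop]
      simp only [List.reverse_cons, List.reverse_nil]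
      rw [dif_neg (by simp)]
      simp only [List.getLast?_concat, List.dropLast_concat, List.getLast?_nil,
        List.dropLast_nil, Option.getD_some, Option.getD_none]
      have ih0 := ih []
      simp only [List.reverse_nil] at ih0
      rw [ih0]
      simp [rowOf]
    | cons n ns =>
      rw [pvCellLoop]
      simp only [List.reverse_cons]
      rw [dif_neg (by simp)]
      simp only [List.getLast?_concat, List.dropLast_concat, Option.getD_some]
      rw [ih]
      simp [rowOf]

-- B's outer stack loop computes tableOf
lemma pv_rowLoop_eq : ∀ (os ns : List (List String)) (acc : List (List (String × String × String))),
    pvRowLoop os.reverse ns.reverse acc = acc ++ tableOf os ns := by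
  intro os
  induction os with
  | nil =>
    intro ns
    induction ns with
    | nil => intro acc; rw [pvRowLoop]; simp [tableOf]
    | cons r rs ih =>
      intro acc
      rw [pvRowLoop]
      simp only [List.reverse_cons, List.reverse_nil]
      rw [dif_neg (by simp)]
      simp only [List.getLast?_concat, List.dropLast_concat, List.getLast?_nil,
        List.dropLast_nil, Option.getD_some, Option.getD_none]
      simp only [List.reverse_nil] at ih
      rw [ih]
      have := pv_cellLoop_eq [] r []
      simp only [List.reverse_nil] at this
      simp [tableOf, this]
  | cons r rs ih =>
    intro ns acc
    cases ns with
    | nil =>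
      rw [pvRowLoop]
      simp only [List.reverse_cons, List.reverse_nil]
      rw [dif_neg (by simp)]
      simp only [List.getLast?_concat, List.dropLast_concat, List.getLast?_nil,
        List.dropLast_nil, Option.getD_some, Option.getD_none]
      have ih0 := ih []
      simp only [List.reverse_nil] at ih0
      rw [ih0]
      have := pv_cellLoop_eq r [] []
      simp only [List.reverse_nil] at this
      simp [tableOf, this]
    | cons s ss =>
      rw [pvRowLoop]
      simp only [List.reverse_cons]
      rw [dif_neg (by simp)]
      simp only [List.getLast?_concat, List.dropLast_concat, Option.getD_some]
      rw [ih]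
      have := pv_cellLoop_eq r s []
      simp [tableOf, this]

-- 'xs[k] if k < len(xs) else fill' is just getD once k is a natural index
lemma pv_getIf_eq {α : Type} (xs : List α) (f : α) (k : Nat) :
    (if (k : Int) < (xs.length : Int) then PySem.List.pyGetD xs (k : Int) f else f) = xs.getD k f := by
  split_ifs with h
  · exact PySem.List.pyGetD_natCast xs k f
  · have hk : xs.length ≤ k := by exact_mod_cast not_lt.mp h
    simp [List.getD_eq_getElem?_getD, List.getElem?_eq_none hk]

-- A's layered tag expression is pvTag
lemma pvTagA_eq (o n : String) :
    (if o == "" && n != "" then "insert"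
     else if n == "" && o != "" then "delete"
     else if o == n then "equal" else "replace") = pvTag o n := by
  by_cases h1 : o = n <;> by_cases h2 : o = "" <;> by_cases h3 : n = "" <;>
    simp_all [pvTag]

-- the range/getD form of one diff row equals rowOf
lemma pv_rowOf_range : ∀ (xs ys : List String),
    (List.range (max xs.length ys.length)).map
      (fun k => (xs.getD k "", ys.getD k "", pvTag (xs.getD k "") (ys.getD k ""))) = rowOf xs ys := by
  intro xs
  induction xs with
  | nil =>
    intro ys
    induction ys with
    | nil => simp [rowOf]
    | cons n ns ih =>
      simp only [List.length_nil, List.length_cons, Nat.max_eq_right (Nat.zero_le _)] at *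
      rw [List.range_succ_eq_map, List.map_cons, List.map_map]
      simp only [Function.comp_def, List.getD_cons_succ, List.getD_nil]
      rw [show (fun k => ((([] : List String).getD k ""), ns.getD k "",
            pvTag (([] : List String).getD k "") (ns.getD k ""))) =
          (fun k => ("", ns.getD k "", pvTag "" (ns.getD k ""))) from by
            funext k; simp] at ih
      rw [ih]
      simp [rowOf]
  | cons o os ih =>
    intro ys
    cases ys with
    | nil =>
      simp only [List.length_cons, List.length_nil, Nat.max_eq_left (Nat.zero_le _)]
      rw [List.range_succ_eq_map, List.map_cons, List.map_map]
      simp only [Function.comp_def, List.getD_cons_succ, List.getD_cons_zero, List.getD_nil]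
      have := ih []
      simp only [List.length_nil, Nat.max_eq_left (Nat.zero_le _), List.getD_nil] at this
      rw [this]
      simp [rowOf]
    | cons n ns =>
      simp only [List.length_cons, Nat.succ_max_succ]
      rw [List.range_succ_eq_map, List.map_cons, List.map_map]
      simp only [Function.comp_def, List.getD_cons_succ, List.getD_cons_zero]
      rw [ih ns]
      simp [rowOf]

-- A's inner index loop over range(max_cols), with both accumulators split
lemma pv_innerA (or nr : List String) (d : PySem.Dict String Int) :
    (PySem.List.pyRange 0 (max (or.length : Int) (nr.length : Int)) 1).foldl (fun st2 j =>
      let old_cell := if j < (or.length : Int) then PySem.List.pyGetD or j "" else ""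
      let new_cell := if j < (nr.length : Int) then PySem.List.pyGetD nr j "" else ""
      let tag := if old_cell == new_cell then "equal" else "replace"
      let tag := if old_cell == "" && new_cell != "" then "insert"
                 else if new_cell == "" && old_cell != "" then "delete" else tag
      (st2.1 ++ [(old_cell, new_cell, tag)], st2.2.modify tag 0 (· + 1)))
      (([] : List (String × String × String)), d)
    = (rowOf or nr, (rowOf or nr).foldl (fun d t => d.modify t.2.2 0 (· + 1)) d) := by
  have hmax : max (or.length : Int) (nr.length : Int) = ((max or.length nr.length : Nat) : Int) := by
    push_cast; rfl
  rw [hmax, PySem.List.pyRange_zero_natCast, List.foldl_map]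
  simp only [pv_getIf_eq, pvTagA_eq]
  rw [PySem.List.foldl_prod_mk
        (f := fun acc (k : Nat) =>
          acc ++ [((or.getD k ""), (nr.getD k ""), pvTag (or.getD k "") (nr.getD k ""))])
        (g := fun dd (k : Nat) =>
          PySem.Dict.modify dd (pvTag (or.getD k "") (nr.getD k "")) 0 (· + 1))]
  rw [Prod.mk.injEq]
  refine ⟨?_, ?_⟩
  · rw [PySem.List.foldl_append_singleton_eq_map, List.nil_append, pv_rowOf_range]
  · rw [← pv_rowOf_range or nr, List.foldl_map]

-- every tag in the table is one of the four
lemma pvTag_mem (o n : String) : pvTag o n ∈ ["replace", "insert", "delete", "equal"] := by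
  unfold pvTag; split_ifs <;> simp

lemma rowOf_tags_mem : ∀ (xs ys : List String), ∀ t ∈ rowOf xs ys,
    t.2.2 ∈ ["replace", "insert", "delete", "equal"] := by
  intro xs ys
  induction xs, ys using rowOf.induct with
  | case1 => intro t ht; simp [rowOf] at ht
  | case2 o os ih =>
    intro t ht
    simp only [rowOf] at ht
    rcases (List.mem_cons.mp ht) with rfl | h
    · exact pvTag_mem _ _
    · exact ih t h
  | case3 n ns ih =>
    intro t ht
    simp only [rowOf] at ht
    rcases (List.mem_cons.mp ht) with rfl | h
    · exact pvTag_mem _ _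
    · exact ih t h
  | case4 o os n ns ih =>
    intro t ht
    simp only [rowOf] at ht
    rcases (List.mem_cons.mp ht) with rfl | h
    · exact pvTag_mem _ _
    · exact ih t h

-- Set.update with elements already present is the identity
lemma pv_set_update_id (keys : List String) (hnd : keys.Nodup) :
    ∀ (l : List String), (∀ t ∈ l, t ∈ keys) → PySem.Set.update keys l = keys := by
  intro l
  induction l generalizing keys with
  | nil => intro _; rfl
  | cons x xs ih =>
    intro h
    have hx : PySem.Set.add keys x = keys := by
      simp [PySem.Set.add, PySem.Set.contains, h x (by simp)]
    show PySem.Set.update (PySem.Set.add keys x) xs = keys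
    rw [hx]
    exact ih keys hnd (fun t ht => h t (by simp [ht]))

-- the counting fold over the zero dict, as an items list
lemma pv_count_items (l : List String)
    (h : ∀ t ∈ l, t ∈ ["replace", "insert", "delete", "equal"]) :
    (l.foldl (fun d t => d.modify t 0 (· + 1))
      (PySem.Dict.ofList [("replace", (0:Int)), ("insert", 0), ("delete", 0), ("equal", 0)])).items
    = [("replace", (l.count "replace" : Int)), ("insert", (l.count "insert" : Int)),
       ("delete", (l.count "delete" : Int)), ("equal", (l.count "equal" : Int))] := by
  set d0 : PySem.Dict String Int :=
    PySem.Dict.ofList [("replace", (0:Int)), ("insert", 0), ("delete", 0), ("equal", 0)] with hd0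
  have hkeys : (l.foldl (fun d t => d.modify t 0 (· + 1)) d0).keys = ["replace", "insert", "delete", "equal"] := by
    rw [PySem.Dict.keys_foldl_modify]
    have : d0.keys = ["replace", "insert", "delete", "equal"] := by rw [hd0]; rfl
    rw [this]
    exact pv_set_update_id _ (by decide) l h
  have hnd : (l.foldl (fun d t => d.modify t 0 (· + 1)) d0).keys.Nodup := by
    rw [hkeys]; decide
  rw [PySem.Dict.items_eq_map_keys _ hnd 0, hkeys]
  simp only [List.map_cons, List.map_nil]
  rw [PySem.Dict.getD_foldl_modify_add_one, PySem.Dict.getD_foldl_modify_add_one,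
      PySem.Dict.getD_foldl_modify_add_one, PySem.Dict.getD_foldl_modify_add_one]
  have h1 : d0.getD "replace" 0 = 0 := by rw [hd0]; decide
  have h2 : d0.getD "insert" 0 = 0 := by rw [hd0]; decide
  have h3 : d0.getD "delete" 0 = 0 := by rw [hd0]; decide
  have h4 : d0.getD "equal" 0 = 0 := by rw [hd0]; decide
  rw [h1, h2, h3, h4]
  simp

-- the range/getD form of the aligned table equals tableOf
lemma pv_tableOf_range : ∀ (os ns : List (List String)),
    (List.range (max os.length ns.length)).map
      (fun k => rowOf (os.getD k []) (ns.getD k [])) = tableOf os ns := by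
  intro os
  induction os with
  | nil =>
    intro ns
    induction ns with
    | nil => simp [tableOf]
    | cons r rs ihn =>
      simp only [List.length_nil, List.length_cons, Nat.max_eq_right (Nat.zero_le _)] at *
      rw [List.range_succ_eq_map, List.map_cons, List.map_map]
      simp only [Function.comp_def, List.getD_cons_succ, List.getD_cons_zero, List.getD_nil]
      rw [show (fun k => rowOf (([] : List (List String)).getD k []) (rs.getD k [])) =
          (fun k => rowOf [] (rs.getD k [])) from by funext k; simp] at ihn
      rw [ihn]
      simp [tableOf]
  | cons r rs ih =>
    intro ns
    cases ns with
    | nil =>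
      simp only [List.length_cons, List.length_nil, Nat.max_eq_left (Nat.zero_le _)]
      rw [List.range_succ_eq_map, List.map_cons, List.map_map]
      simp only [Function.comp_def, List.getD_cons_succ, List.getD_cons_zero, List.getD_nil]
      have := ih []
      simp only [List.length_nil, Nat.max_eq_left (Nat.zero_le _), List.getD_nil] at this
      rw [this]
      simp [tableOf]
    | cons s ss =>
      simp only [List.length_cons, Nat.succ_max_succ]
      rw [List.range_succ_eq_map, List.map_cons, List.map_map]
      simp only [Function.comp_def, List.getD_cons_succ, List.getD_cons_zero]
      rw [ih ss]
      simp [tableOf]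

-- every tag of the aligned table is one of the four
lemma pv_tableOf_tags_mem : ∀ (os ns : List (List String))
    (row : List (String × String × String)), row ∈ tableOf os ns →
    ∀ e ∈ row, e.2.2 ∈ ["replace", "insert", "delete", "equal"] := by
  intro os ns
  induction os, ns using tableOf.induct with
  | case1 => intro row hrow; simp [tableOf] at hrow
  | case2 r rs ih =>
    intro row hrow e he
    simp only [tableOf] at hrow
    rcases (List.mem_cons.mp hrow) with rfl | h
    · exact rowOf_tags_mem _ _ e he
    · exact ih row h e he
  | case3 r rs ih =>
    intro row hrow e he
    simp only [tableOf] at hrow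
    rcases (List.mem_cons.mp hrow) with rfl | h
    · exact rowOf_tags_mem _ _ e he
    · exact ih row h e he
  | case4 r rs s ss ih =>
    intro row hrow e he
    simp only [tableOf] at hrow
    rcases (List.mem_cons.mp hrow) with rfl | h
    · exact rowOf_tags_mem _ _ e he
    · exact ih row h e he

-- the whole function values coincide
lemma pv_main (old_table new_table : List (List String)) :
    get_aligned_table_diff old_table new_table = get_aligned_table_diff_alt old_table new_table := by
  simp only [get_aligned_table_diff, get_aligned_table_diff_alt]
  -- B's stack loops compute tableOf
  rw [pv_rowLoop_eq old_table new_table [], List.nil_append]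
  -- A's outer index loop
  have hmax : max (old_table.length : Int) (new_table.length : Int)
      = ((max old_table.length new_table.length : Nat) : Int) := by push_cast; rfl
  rw [hmax, PySem.List.pyRange_zero_natCast, List.foldl_map]
  simp only [pv_getIf_eq, pv_innerA]
  rw [PySem.List.foldl_prod_mk
        (f := fun (acc : List (List (String × String × String))) (k : Nat) =>
          acc ++ [rowOf (old_table.getD k []) (new_table.getD k [])])
        (g := fun (dd : PySem.Dict String Int) (k : Nat) =>
          List.foldl (fun d t => PySem.Dict.modify d t.2.2 0 (fun x => x + 1)) dd
            (rowOf (old_table.getD k []) (new_table.getD k [])))]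
  dsimp only
  rw [PySem.List.foldl_append_singleton_eq_map, List.nil_append, pv_tableOf_range]
  -- the counting fold over rows is a fold over the flattened tag list
  have hflat : (List.range (max old_table.length new_table.length)).foldl
      (fun dd k => List.foldl (fun d t => PySem.Dict.modify d t.2.2 0 (fun x => x + 1)) dd
        (rowOf (old_table.getD k []) (new_table.getD k [])))
      (PySem.Dict.ofList [("replace", (0:Int)), ("insert", 0), ("delete", 0), ("equal", 0)])
    = ((tableOf old_table new_table).flatMap (fun row => row.map (fun t => t.2.2))).foldl
      (fun d t => PySem.Dict.modify d t 0 (fun x => x + 1))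
      (PySem.Dict.ofList [("replace", (0:Int)), ("insert", 0), ("delete", 0), ("equal", 0)]) := by
    rw [← List.foldl_map, pv_tableOf_range, List.flatMap_def, List.foldl_flatten, List.foldl_map]
    apply PySem.List.foldl_congr_mem
    intro acc row _
    rw [List.foldl_map]
  rw [hflat]
  have htags : ∀ t ∈ (tableOf old_table new_table).flatMap (fun row => row.map (fun t => t.2.2)),
      t ∈ ["replace", "insert", "delete", "equal"] := by
    intro t ht
    simp only [List.mem_flatMap, List.mem_map] at ht
    obtain ⟨row, hrow, e, he, rfl⟩ := ht
    exact pv_tableOf_tags_mem old_table new_table row hrow e he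
  rw [pv_count_items _ htags]

-- ===== VERDICT (by name: the statement is the Claim_ definition above) =====
theorem get_aligned_table_diff_spec : Claim_equal_get_aligned_table_diff := by
  intro old_table new_table _
  exact pv_main old_table new_table
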